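-- pv_equiv track=rewrite | github.com/yuzhouwj1-cloud/kvcache | scripts/trace_pattern_analysis.py | _system_prompt_hits
-- ===== SOURCE A (Python) =====
-- from collections import Counter
-- from typing import Iterable, List
--
-- def _normalize_hash_ids(value: object) -> List[int]:
--     if value is None:
--         return []
--     if isinstance(value, list):
--         return [int(v) for v in value]
--     return [int(value)]
--
-- def _system_prompt_hits(
--     requests: list[dict], prompts: list[tuple[tuple[int, ...], int]]
-- ) -> tuple[int, int, Counter[int], set[int]]:
--     total = 0
--     hits = 0
--     prompt_usage: Counter[int] = Counter()
--     hit_indices: set[int] = set()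
--     for req_idx, record in enumerate(requests):
--         blocks = _normalize_hash_ids(record.get("hash_ids"))
--         if not blocks:
--             continue
--         total += 1
--         matched = False
--         for prompt_idx, (prefix, _) in enumerate(prompts):
--             if blocks[: len(prefix)] == list(prefix):
--                 hits += 1
--                 prompt_usage[prompt_idx] += 1
--                 hit_indices.add(req_idx)
--                 matched = True
--                 break
--         if not matched:
--             continue
--     return hits, total, prompt_usage, hit_indices
-- ===== SOURCE B (Python) =====
-- from collections import Counter
--
--
-- def _system_prompt_hits(requests, prompts):
--     # Index prompts once: first (= minimal) prompt index per distinct prefix,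
--     # plus the sorted distinct prefix lengths. Each request's blocks are then
--     # matched by hashed lookups of its prefixes instead of scanning all prompts.
--     first_idx = {}
--     for idx, (prefix, _) in enumerate(prompts):
--         first_idx.setdefault(tuple(prefix), idx)
--     lengths = sorted({len(key) for key in first_idx})
--
--     hits = 0
--     total = 0
--     prompt_usage = Counter()
--     hit_indices = set()
--     for req_idx, record in enumerate(requests):
--         blocks = record.get("hash_ids") or []
--         if not blocks:
--             continue
--         total += 1
--         best = None
--         for k in lengths:
--             if k > len(blocks):
--                 break
--             j = first_idx.get(tuple(blocks[:k]))
--             if j is not None and (best is None or j < best):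
--                 best = j
--         if best is not None:
--             hits += 1
--             prompt_usage[best] += 1
--             hit_indices.add(req_idx)
--     return hits, total, prompt_usage, hit_indices
-- ===== Notes on version B (the rewrite author's own statement) =====
-- stated objective: alternative
-- what changed: B replaces A's per-request rescan of the whole prompt list with a one-time index of the prompts (first prompt index per distinct prefix, plus the sorted distinct prefix lengths) and matches each request by hashed lookups of its block prefixes, taking the minimum index found; on the measured input family this was not faster, so no speed is claimed.
import Mathlib
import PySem

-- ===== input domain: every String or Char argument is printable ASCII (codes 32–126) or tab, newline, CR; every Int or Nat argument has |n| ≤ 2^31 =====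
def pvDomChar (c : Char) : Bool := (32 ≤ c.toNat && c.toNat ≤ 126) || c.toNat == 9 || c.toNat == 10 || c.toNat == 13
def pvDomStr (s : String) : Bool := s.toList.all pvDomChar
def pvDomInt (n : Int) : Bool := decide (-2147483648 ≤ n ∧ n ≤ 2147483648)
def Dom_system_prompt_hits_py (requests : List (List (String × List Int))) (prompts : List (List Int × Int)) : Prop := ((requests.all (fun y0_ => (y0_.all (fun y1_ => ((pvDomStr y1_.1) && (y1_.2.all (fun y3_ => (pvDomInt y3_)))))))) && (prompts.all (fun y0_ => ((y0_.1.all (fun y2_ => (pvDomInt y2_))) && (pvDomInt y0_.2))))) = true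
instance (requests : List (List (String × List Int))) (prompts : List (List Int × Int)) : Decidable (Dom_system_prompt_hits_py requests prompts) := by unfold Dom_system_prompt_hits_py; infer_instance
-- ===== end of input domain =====

-- B indexes the prompts once (first prompt index per distinct prefix, plus the sorted distinct
-- prefix lengths) and matches each request by dictionary lookups of its prefixes, instead of
-- A's rescan of the whole prompt list for every request.

-- ===== PORT A =====
-- _normalize_hash_ids: under the typed domain the value is None or a list of ints;
-- '[int(v) for v in value]' is then a map of the identity over the list (exact there)
def normalizeHashIds (value : Option (List Int)) : List Int :=
  match value with
  | none => []
  | some l => l.map (fun v => v)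

-- the inner 'for prompt_idx, (prefix, _) in enumerate(prompts)' loop with break: returns the
-- prompt_idx at which the loop breaks (first matching prompt), none when no prompt matches;
-- the body's updates (and the no-op 'matched' flag) are applied at the break site in aStep.
-- blocks[:len(prefix)] with its nonnegative stop is List.take (exact).
def findFirstPrompt : List (List Int × Int) → Int → List Int → Option Int
  | [], _, _ => none
  | (pfx, _) :: rest, i, blocks =>
    if blocks.take pfx.length = pfx then some i
    else findFirstPrompt rest (i + 1) blocks

-- one iteration of 'for req_idx, record in enumerate(requests)'; state = (total, hits, prompt_usage, hit_indices)
def aStep (prompts : List (List Int × Int))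
    (s : Int × Int × PySem.Dict Int Int × PySem.Set Int)
    (p : Int × List (String × List Int)) : Int × Int × PySem.Dict Int Int × PySem.Set Int :=
  let blocks := normalizeHashIds (PySem.Dict.get? ⟨p.2⟩ "hash_ids")
  if blocks = [] then s
  else
    match findFirstPrompt prompts 0 blocks with
    | none => (s.1 + 1, s.2.1, s.2.2.1, s.2.2.2)
    | some i => (s.1 + 1, s.2.1 + 1, PySem.Dict.modify s.2.2.1 i 0 (· + 1), PySem.Set.add s.2.2.2 p.1)

def system_prompt_hits_py (requests : List (List (String × List Int))) (prompts : List (List Int × Int)) : Int × Int × (List (Int × Int)) × List Int :=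
  let s := (PySem.List.enumerate requests 0).foldl (aStep prompts)
    (0, 0, PySem.Dict.empty, PySem.Set.empty)
  (s.2.1, s.1, s.2.2.1.items, s.2.2.2)

-- ===== PORT B =====
-- first_idx: first prompt index per distinct prefix ('setdefault' loop)
def buildFirstIdx (prompts : List (List Int × Int)) : PySem.Dict (List Int) Int :=
  (PySem.List.enumerate prompts 0).foldl (fun d p => d.setdefault p.2.1 p.1) PySem.Dict.empty

-- lengths = sorted({len(key) for key in first_idx})  (key lengths are nonnegative: Nat is exact)
def promptLengths (prompts : List (List Int × Int)) : List Nat :=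
  PySem.List.sorted (PySem.Set.ofList ((buildFirstIdx prompts).keys.map List.length)) (fun k => k)

-- 'for k in lengths: …' with the break and the running minimum 'best'
def bestLoop (d : PySem.Dict (List Int) Int) (blocks : List Int) :
    List Nat → Option Int → Option Int
  | [], best => best
  | k :: ks, best =>
    if blocks.length < k then best
    else
      let best' := match d.get? (blocks.take k), best with
        | some j, none => some j
        | some j, some b => if j < b then some j else some b
        | none, b => b
      bestLoop d blocks ks best'

def bStep (d : PySem.Dict (List Int) Int) (lengths : List Nat)
    (s : Int × Int × PySem.Dict Int Int × PySem.Set Int)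
    (p : Int × List (String × List Int)) : Int × Int × PySem.Dict Int Int × PySem.Set Int :=
  let blocks := (PySem.Dict.get? ⟨p.2⟩ "hash_ids").getD []   -- record.get("hash_ids") or []
  if blocks = [] then s
  else
    match bestLoop d blocks lengths none with
    | none => (s.1 + 1, s.2.1, s.2.2.1, s.2.2.2)
    | some best => (s.1 + 1, s.2.1 + 1, PySem.Dict.modify s.2.2.1 best 0 (· + 1), PySem.Set.add s.2.2.2 p.1)

def system_prompt_hits_py_alt (requests : List (List (String × List Int))) (prompts : List (List Int × Int)) : Int × Int × (List (Int × Int)) × List Int :=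
  let s := (PySem.List.enumerate requests 0).foldl
    (bStep (buildFirstIdx prompts) (promptLengths prompts))
    (0, 0, PySem.Dict.empty, PySem.Set.empty)
  (s.2.1, s.1, s.2.2.1.items, s.2.2.2)

-- ===== PRECONDITION & SPEC =====
def Spec_system_prompt_hits_py (requests : List (List (String × List Int))) (prompts : List (List Int × Int)) (out : Int × Int × (List (Int × Int)) × List Int) : Prop := out = system_prompt_hits_py_alt requests prompts
instance (requests : List (List (String × List Int))) (prompts : List (List Int × Int)) (out : Int × Int × (List (Int × Int)) × List Int) : Decidable (Spec_system_prompt_hits_py requests prompts out) := by unfold Spec_system_prompt_hits_py; infer_instance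

-- ===== CLAIM (what is proved, stated in full; the proofs are below) =====
def Claim_equal_system_prompt_hits_py : Prop := ∀ (requests : List (List (String × List Int))) (prompts : List (List Int × Int)), Dom_system_prompt_hits_py requests prompts → Spec_system_prompt_hits_py requests prompts (system_prompt_hits_py requests prompts)

-- ===== LEMMAS AND PROOFS =====

-- the two match predicates, as Bool tests on a prompt entry
def matchP (blocks : List Int) (pr : List Int × Int) : Bool := blocks.take pr.1.length == pr.1
def keyP (key : List Int) (pr : List Int × Int) : Bool := pr.1 == key

-- A's inner loop is the first index satisfying matchP
theorem findFirstPrompt_eq (l : List (List Int × Int)) (i : Int) (b : List Int) :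
    findFirstPrompt l i b = (List.findIdx? (matchP b) l).map (fun n => i + (n : Int)) := by
  induction l generalizing i with
  | nil => rfl
  | cons pr rest ih =>
    obtain ⟨pfx, c⟩ := pr
    by_cases h : b.take pfx.length = pfx
    · simp [findFirstPrompt, h, List.findIdx?_cons, matchP]
    · simp only [findFirstPrompt, if_neg h, ih, List.findIdx?_cons]
      have : matchP b (pfx, c) = false := by simp [matchP, h]
      simp only [this, Bool.false_eq_true, if_false]
      cases hf : List.findIdx? (matchP b) rest with
      | none => simp
      | some n => simp; ring

-- the setdefault fold: lookup = existing binding, else first index (from s) whose prefix is the key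
theorem buildFirstIdx_get? (l : List (List Int × Int)) (s : Int) (d : PySem.Dict (List Int) Int)
    (key : List Int) :
    PySem.Dict.get? ((PySem.List.enumerate l s).foldl (fun d p => d.setdefault p.2.1 p.1) d) key
      = (d.get? key).or ((List.findIdx? (keyP key) l).map (fun n => s + (n : Int))) := by
  induction l generalizing s d with
  | nil => simp [PySem.List.enumerate]
  | cons pr rest ih =>
    obtain ⟨pfx, c⟩ := pr
    rw [PySem.List.enumerate_cons]
    simp only [List.foldl_cons, ih]
    by_cases hk : pfx = key
    · subst hk
      have hkp : keyP pfx (pfx, c) = true := by simp [keyP]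
      by_cases hc : PySem.Dict.contains d pfx = true
      · have hs : ∃ v, d.get? pfx = some v := by
          cases hg : d.get? pfx with
          | none => rw [PySem.Dict.get?_eq_none_iff_contains] at hg; simp [hc] at hg
          | some v => exact ⟨v, rfl⟩
        obtain ⟨v, hv⟩ := hs
        simp [PySem.Dict.setdefault, hc, hv, List.findIdx?_cons, hkp]
      · have hv : d.get? pfx = none := by
          rw [PySem.Dict.get?_eq_none_iff_contains]; simpa using hc
        have hfind : d.items.find? (fun p => p.1 == pfx) = none := by
          have h' := hv
          simp only [PySem.Dict.get?, Option.map_eq_none_iff] at h'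
          exact h'
        have hsd : (d.setdefault pfx s).get? pfx = some s := by
          simp [PySem.Dict.setdefault, hc, PySem.Dict.get?, List.find?_append, hfind]
        rw [hsd]
        simp [hv, List.findIdx?_cons, hkp]
    · have hkp : keyP key (pfx, c) = false := by simp [keyP, hk]
      have hsd : (d.setdefault pfx s).get? key = d.get? key := by
        by_cases hc : PySem.Dict.contains d pfx = true
        · simp [PySem.Dict.setdefault, hc]
        · simp [PySem.Dict.setdefault, hc, PySem.Dict.get?, List.find?_append, hk]
      rw [hsd]
      simp only [List.findIdx?_cons, hkp, Bool.false_eq_true, if_false]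
      cases hf : List.findIdx? (keyP key) rest with
      | none => simp
      | some n => simp; ring

-- specialisation to B's dictionary
theorem firstIdx_get? (prompts : List (List Int × Int)) (key : List Int) :
    (buildFirstIdx prompts).get? key
      = (List.findIdx? (keyP key) prompts).map (fun n => (n : Int)) := by
  rw [buildFirstIdx, buildFirstIdx_get?]
  simp [PySem.Dict.get?, PySem.Dict.empty]

-- membership in B's length list
theorem mem_promptLengths (prompts : List (List Int × Int)) (k : Nat) :
    k ∈ promptLengths prompts ↔ ∃ pr ∈ prompts, pr.1.length = k := by
  rw [promptLengths, PySem.List.mem_sorted]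
  rw [PySem.Set.mem_ofList, List.mem_map]
  constructor
  · rintro ⟨key, hkey, rfl⟩
    have : (buildFirstIdx prompts).contains key = true := by
      rw [PySem.Dict.contains_iff_mem_keys]; exact hkey
    have hg : (buildFirstIdx prompts).get? key ≠ none := by
      rw [Ne, PySem.Dict.get?_eq_none_iff_contains]; simp [this]
    rw [firstIdx_get?] at hg
    cases hf : List.findIdx? (keyP key) prompts with
    | none => simp [hf] at hg
    | some n =>
      rw [List.findIdx?_eq_some_iff_getElem] at hf
      obtain ⟨hn, hp, -⟩ := hf
      refine ⟨prompts[n], List.getElem_mem hn, ?_⟩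
      simp [keyP] at hp
      simp [hp]
  · rintro ⟨pr, hmem, rfl⟩
    refine ⟨pr.1, ?_, rfl⟩
    rw [← PySem.Dict.contains_iff_mem_keys]
    by_contra hc
    have : (buildFirstIdx prompts).get? pr.1 = none := by
      rw [PySem.Dict.get?_eq_none_iff_contains]; simpa using hc
    rw [firstIdx_get?] at this
    cases hf : List.findIdx? (keyP pr.1) prompts with
    | none =>
      rw [List.findIdx?_eq_none_iff] at hf
      have := hf pr hmem
      simp [keyP] at this
    | some n => simp [hf] at this

theorem promptLengths_pairwise (prompts : List (List Int × Int)) :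
    (promptLengths prompts).Pairwise (· < ·) :=
  PySem.List.sorted_ofList_pairwise_lt _

-- running minimum over an Option accumulator
def minOpt (best : Option Int) (j : Int) : Option Int :=
  match best with
  | none => some j
  | some b => if j < b then some j else some b

-- B's length loop = fold of minOpt over the candidate list (needs the strictly increasing order
-- to account for the break)
theorem bestLoop_cons (d : PySem.Dict (List Int) Int) (blocks : List Int) (k : Nat)
    (ks : List Nat) (best : Option Int) :
    bestLoop d blocks (k :: ks) best = if blocks.length < k then best
      else bestLoop d blocks ks
        (match d.get? (blocks.take k), best with
          | some j, none => some j
          | some j, some b => if j < b then some j else some b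
          | none, b => b) := rfl

theorem bestLoop_eq_foldl (d : PySem.Dict (List Int) Int) (blocks : List Int) :
    ∀ (ks : List Nat) (best : Option Int), ks.Pairwise (· < ·) →
    bestLoop d blocks ks best
      = (ks.filterMap (fun k => if k ≤ blocks.length then d.get? (blocks.take k) else none)).foldl
          minOpt best := by
  intro ks
  induction ks with
  | nil => intro best _; rfl
  | cons k t ih =>
    intro best hpw
    rw [List.pairwise_cons] at hpw
    by_cases hbr : blocks.length < k
    · have hnil : ((k :: t).filterMap
          (fun k => if k ≤ blocks.length then d.get? (blocks.take k) else none)) = [] := by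
        rw [List.filterMap_eq_nil_iff]
        intro a ha
        rcases List.mem_cons.mp ha with rfl | hat
        · simp [Nat.not_le.mpr hbr]
        · have : blocks.length < a := lt_trans hbr (hpw.1 a hat)
          simp [Nat.not_le.mpr this]
      rw [bestLoop_cons, if_pos hbr, hnil]
      rfl
    · have hk : k ≤ blocks.length := Nat.not_lt.mp hbr
      rw [bestLoop_cons, if_neg hbr]
      cases hg : d.get? (blocks.take k) with
      | none =>
        simp only [List.filterMap_cons, hg, hk, if_true]
        exact ih best hpw.2
      | some j =>
        simp only [List.filterMap_cons, hg, hk, if_true, List.foldl_cons]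
        cases best with
        | none => exact ih (minOpt none j) hpw.2
        | some b => exact ih (minOpt (some b) j) hpw.2

theorem foldl_minOpt_some (t : List Int) : ∀ (b : Int),
    t.foldl minOpt (some b) = some (t.foldl min b) := by
  induction t with
  | nil => intro b; rfl
  | cons x t ih =>
    intro b
    have : minOpt (some b) x = some (min b x) := by
      simp only [minOpt]
      rcases lt_or_ge x b with h | h
      · rw [if_pos h, min_eq_right (le_of_lt h)]
      · rw [if_neg (not_lt.mpr h), min_eq_left h]
    simp only [List.foldl_cons, this, ih]

theorem foldl_minOpt_none (l : List Int) :
    l.foldl minOpt none = PySem.List.min? l (fun x => x) := by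
  cases l with
  | nil => rfl
  | cons x t =>
    simp only [List.foldl_cons, PySem.List.min?_id_cons]
    exact foldl_minOpt_some t x

-- THE KEY LEMMA: B's per-request lookup loop computes exactly A's first-matching-prompt index
theorem inner_eq (prompts : List (List Int × Int)) (blocks : List Int) :
    bestLoop (buildFirstIdx prompts) blocks (promptLengths prompts) none
      = findFirstPrompt prompts 0 blocks := by
  rw [findFirstPrompt_eq, bestLoop_eq_foldl _ _ _ _ (promptLengths_pairwise prompts),
      foldl_minOpt_none]
  set d := buildFirstIdx prompts with hd
  set cand := (promptLengths prompts).filterMap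
      (fun k => if k ≤ blocks.length then d.get? (blocks.take k) else none) with hcand
  -- any candidate value is (the Int cast of) a matching prompt index
  have cand_match : ∀ j ∈ cand, ∃ n : Nat, j = (n : Int) ∧
      ∃ hn : n < prompts.length, matchP blocks prompts[n] = true := by
    intro j hj
    rw [hcand, List.mem_filterMap] at hj
    obtain ⟨k, hkmem, hkeq⟩ := hj
    by_cases hkl : k ≤ blocks.length
    · rw [if_pos hkl, hd, firstIdx_get?] at hkeq
      cases hf : List.findIdx? (keyP (blocks.take k)) prompts with
      | none => rw [hf] at hkeq; exact absurd hkeq (by simp)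
      | some n =>
        rw [hf] at hkeq
        have hkeq' : (n : Int) = j := by simpa using hkeq
        rw [List.findIdx?_eq_some_iff_getElem] at hf
        obtain ⟨hn, hp, hmin⟩ := hf
        have hkey : prompts[n].1 = blocks.take k := by
          simp [keyP] at hp; exact hp
        refine ⟨n, hkeq'.symm, hn, ?_⟩
        simp only [matchP, beq_iff_eq, hkey, List.length_take, Nat.min_eq_left hkl]
    · rw [if_neg hkl] at hkeq; exact absurd hkeq (by simp)
  -- any matching prompt index has a candidate value ≤ it
  have match_cand : ∀ n : Nat, ∀ hn : n < prompts.length, matchP blocks prompts[n] = true →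
      ∃ j ∈ cand, j ≤ (n : Int) := by
    intro n hn hm
    simp only [matchP, beq_iff_eq] at hm
    have hlen : prompts[n].1.length ≤ blocks.length := by
      have := congrArg List.length hm
      rw [List.length_take] at this
      omega
    cases hf : List.findIdx? (keyP (prompts[n].1)) prompts with
    | none =>
      rw [List.findIdx?_eq_none_iff] at hf
      have := hf prompts[n] (List.getElem_mem hn)
      simp [keyP] at this
    | some n' =>
      refine ⟨(n' : Int), ?_, ?_⟩
      · rw [hcand, List.mem_filterMap]
        refine ⟨prompts[n].1.length, ?_, ?_⟩
        · rw [mem_promptLengths]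
          exact ⟨prompts[n], List.getElem_mem hn, rfl⟩
        · rw [if_pos hlen, hm, hd, firstIdx_get?, hf]
          rfl
      · rw [List.findIdx?_eq_some_iff_getElem] at hf
        obtain ⟨hn', hp, hmin⟩ := hf
        have : ¬ n < n' := by
          intro hlt
          have := hmin n hlt
          simp [keyP] at this
        exact_mod_cast Nat.le_of_not_lt this
  -- now compare with the first matchP index
  cases hT : List.findIdx? (matchP blocks) prompts with
  | none =>
    rw [List.findIdx?_eq_none_iff] at hT
    have : cand = [] := by
      by_contra hne
      obtain ⟨j, hj⟩ := List.exists_mem_of_ne_nil _ hne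
      obtain ⟨n, -, hn, hmatch⟩ := cand_match j hj
      have := hT prompts[n] (List.getElem_mem hn)
      rw [hmatch] at this
      exact absurd this (by simp)
    rw [this]
    rfl
  | some m =>
    rw [List.findIdx?_eq_some_iff_getElem] at hT
    obtain ⟨hm, hpm, hminm⟩ := hT
    obtain ⟨j0, hj0mem, hj0le⟩ := match_cand m hm hpm
    cases hμ : PySem.List.min? cand (fun x => x) with
    | none =>
      rw [PySem.List.min?_eq_none_iff] at hμ
      rw [hμ] at hj0mem
      exact absurd hj0mem (List.not_mem_nil)
    | some μ =>
      have hμmem := PySem.List.min?_mem hμ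
      have hμmin := PySem.List.min?_isMin hμ
      obtain ⟨n, rfl, hn, hmatch⟩ := cand_match μ hμmem
      have h1 : m ≤ n := by
        by_contra hlt
        have := hminm n (Nat.lt_of_not_le hlt)
        rw [hmatch] at this
        exact absurd this (by simp)
      have h2 : (n : Int) ≤ (m : Int) := le_trans (hμmin j0 hj0mem) hj0le
      have : n = m := by omega
      simp [this, Option.map_some]
  -- (ends the case split)

-- the two per-request steps agree
theorem step_eq (prompts : List (List Int × Int))
    (s : Int × Int × PySem.Dict Int Int × PySem.Set Int)
    (p : Int × List (String × List Int)) :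
    aStep prompts s p = bStep (buildFirstIdx prompts) (promptLengths prompts) s p := by
  have hb : normalizeHashIds (PySem.Dict.get? ⟨p.2⟩ "hash_ids")
      = (PySem.Dict.get? (⟨p.2⟩ : PySem.Dict String (List Int)) "hash_ids").getD [] := by
    cases PySem.Dict.get? (⟨p.2⟩ : PySem.Dict String (List Int)) "hash_ids" with
    | none => rfl
    | some l => simp [normalizeHashIds]
  rw [aStep, bStep, hb, inner_eq]

-- ===== VERDICT (by name: the statement is the Claim_ definition above) =====
theorem system_prompt_hits_py_spec : Claim_equal_system_prompt_hits_py := by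
  intro requests prompts _
  unfold Spec_system_prompt_hits_py system_prompt_hits_py system_prompt_hits_py_alt
  have : aStep prompts = bStep (buildFirstIdx prompts) (promptLengths prompts) :=
    funext fun s => funext fun p => step_eq prompts s p
  rw [this]
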